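-- pv_equiv track=rewrite | github.com/jjustinwilson/pa-kennel-inspections | pdf_parser.py | parse_remarks
-- ===== SOURCE A (Python) =====
-- from typing import List, Optional, Dict
--
-- def parse_remarks(lines: List[str]) -> tuple:
--     """Parse remarks section and check for reinspection requirement."""
--     remarks_lines = []
--     in_remarks = False
--     reinspection_required = False
--
--     for i, line in enumerate(lines):
--         if 'Remarks' in line and not in_remarks:
--             in_remarks = True
--             # Skip the "Remarks" header line and any action lines
--             continue
--
--         if in_remarks:
--             # Collect all text after Remarks
--             remarks_lines.append(line)
--
--             # Check for reinspection requirement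
--             if 'reinspection' in line.lower() or 're-inspection' in line.lower():
--                 if 'required' in line.lower() or 'will take place' in line.lower():
--                     reinspection_required = True
--
--     remarks = '\n'.join(remarks_lines).strip()
--     return remarks, reinspection_required
-- ===== SOURCE B (Python) =====
-- def parse_remarks(lines):
--     """Parse remarks section and check for reinspection requirement."""
--     idx = next((i for i, line in enumerate(lines) if 'Remarks' in line), None)
--     if idx is None:
--         return '', False
--     tail = lines[idx + 1:]
--     remarks = '\n'.join(tail).strip()
--     reinspection_required = any(
--         ('reinspection' in l.lower() or 're-inspection' in l.lower())
--         and ('required' in l.lower() or 'will take place' in l.lower())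
--         for l in tail
--     )
--     return remarks, reinspection_required
-- ===== Notes on version B (the rewrite author's own statement) =====
-- stated objective: simpler
-- what changed: Replaces the single stateful flag-driven pass with a locate-then-process decomposition: find the first 'Remarks' line, slice the tail, then join/strip it and compute the flag with any() over the tail.
import Mathlib
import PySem

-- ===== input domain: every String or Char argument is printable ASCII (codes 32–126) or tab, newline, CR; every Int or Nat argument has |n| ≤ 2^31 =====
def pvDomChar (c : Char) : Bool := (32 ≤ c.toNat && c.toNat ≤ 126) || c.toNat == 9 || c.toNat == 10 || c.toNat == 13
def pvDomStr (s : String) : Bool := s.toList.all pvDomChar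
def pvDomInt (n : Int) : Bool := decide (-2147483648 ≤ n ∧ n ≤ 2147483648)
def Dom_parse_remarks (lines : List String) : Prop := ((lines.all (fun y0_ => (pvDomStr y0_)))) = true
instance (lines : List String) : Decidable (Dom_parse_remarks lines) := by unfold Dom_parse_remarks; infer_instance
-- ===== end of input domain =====

-- B replaces A's single stateful flag-driven pass by a locate-then-process decomposition
-- (find the first 'Remarks' line, slice the tail, join/strip it, any() for the flag); same cost.

-- ===== PORT A =====
-- the reinspection test of A's inner if-pair, on one line
def pvReinspect (line : String) : Bool :=
  (PySem.Str.isIn "reinspection" (PySem.Str.lower line) ||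
   PySem.Str.isIn "re-inspection" (PySem.Str.lower line)) &&
  (PySem.Str.isIn "required" (PySem.Str.lower line) ||
   PySem.Str.isIn "will take place" (PySem.Str.lower line))

-- A's loop body: state = (remarks_lines, in_remarks, reinspection_required)
def pvStepA (st : List String × Bool × Bool) (line : String) : List String × Bool × Bool :=
  if PySem.Str.isIn "Remarks" line && !st.2.1 then (st.1, true, st.2.2)
  else if st.2.1 then (st.1 ++ [line], st.2.1, st.2.2 || pvReinspect line)
  else st

def parse_remarks (lines : List String) : String × Bool :=
  let st := lines.foldl pvStepA ([], false, false)
  (PySem.Str.strip (PySem.Str.join "\n" st.1), st.2.2)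

-- ===== PORT B =====
-- B's inline any() predicate (same two-part substring test, written once)
def pvReinspectB (l : String) : Bool :=
  (PySem.Str.isIn "reinspection" (PySem.Str.lower l) ||
   PySem.Str.isIn "re-inspection" (PySem.Str.lower l)) &&
  (PySem.Str.isIn "required" (PySem.Str.lower l) ||
   PySem.Str.isIn "will take place" (PySem.Str.lower l))

-- the tail after the first line containing 'Remarks'; none if no such line
def pvTailB : List String → Option (List String)
  | [] => none
  | l :: rest => if PySem.Str.isIn "Remarks" l then some rest else pvTailB rest

def parse_remarks_alt (lines : List String) : String × Bool :=
  match pvTailB lines with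
  | none => ("", false)
  | some tail =>
      (PySem.Str.strip (PySem.Str.join "\n" tail), tail.any pvReinspectB)

-- ===== PRECONDITION & SPEC =====
def Spec_parse_remarks (lines : List String) (out : String × Bool) : Prop := out = parse_remarks_alt lines
instance (lines : List String) (out : String × Bool) : Decidable (Spec_parse_remarks lines out) := by unfold Spec_parse_remarks; infer_instance

-- ===== CLAIM (what is proved, stated in full; the proofs are below) =====
def Claim_equal_parse_remarks : Prop := ∀ (lines : List String), Dom_parse_remarks lines → Spec_parse_remarks lines (parse_remarks lines)

-- ===== LEMMAS AND PROOFS =====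

-- once in_remarks is true, A's loop appends every line and ORs the predicate
lemma foldA_inR (ls : List String) (acc : List String) (req : Bool) :
    ls.foldl pvStepA (acc, true, req) = (acc ++ ls, true, req || ls.any pvReinspect) := by
  induction ls generalizing acc req with
  | nil => simp
  | cons l rest ih =>
      simp only [List.foldl, pvStepA, List.any_cons]
      split
      · next h => simp at h
      · simp [ih, Bool.or_assoc]

lemma parse_eq (lines : List String) : parse_remarks lines = parse_remarks_alt lines := by
  induction lines with
  | nil => decide
  | cons l rest ih =>
      by_cases h : PySem.Chars.isIn ['R','e','m','a','r','k','s'] l.toList = true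
      · simp [parse_remarks, parse_remarks_alt, pvTailB, pvStepA, h, foldA_inR]
        rfl
      · have step : pvStepA ([], false, false) l = ([], false, false) := by
          simp [pvStepA, PySem.Str.isIn_eq]
          simpa using h
        have ht : pvTailB (l :: rest) = pvTailB rest := by
          simp [pvTailB, PySem.Str.isIn_eq, h]
        simp only [parse_remarks, parse_remarks_alt, List.foldl, step, ht]
        exact ih

-- ===== VERDICT (by name: the statement is the Claim_ definition above) =====
theorem parse_remarks_spec : Claim_equal_parse_remarks := by
  intro lines _
  exact parse_eq lines
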